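-- pv_equiv track=rewrite | github.com/saurabh-pandey/EPIJudgeClone | epi_judge_python/tests/utils/int_as_array.py | convert
-- ===== SOURCE A (Python) =====
-- from typing import List
--
-- def convert(n: int) -> List[int]:
--     if n == 0:
--         return [0]
--     sign = 1 if n > 0 else -1
--     n = abs(n)
--     digits = []
--     while n:
--         digits.append(n % 10)
--         n //= 10
--     digits.reverse()
--     digits[0] *= sign
--     return digits
-- ===== SOURCE B (Python) =====
-- from typing import List
--
-- def convert(n: int) -> List[int]:
--     digits = [ord(c) - 48 for c in str(abs(n))]
--     if n < 0:
--         digits[0] = -digits[0]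
--     return digits
-- ===== Notes on version B (the rewrite author's own statement) =====
-- stated objective: idiomatic
-- what changed: Replaces the mod/floordiv digit loop plus reverse plus sign-on-head mutation with a forward map over str(abs(n)) (ord(c)-48), negating the head only for negative n; the n==0 special case disappears since str(0) already gives [0].
import Mathlib
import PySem

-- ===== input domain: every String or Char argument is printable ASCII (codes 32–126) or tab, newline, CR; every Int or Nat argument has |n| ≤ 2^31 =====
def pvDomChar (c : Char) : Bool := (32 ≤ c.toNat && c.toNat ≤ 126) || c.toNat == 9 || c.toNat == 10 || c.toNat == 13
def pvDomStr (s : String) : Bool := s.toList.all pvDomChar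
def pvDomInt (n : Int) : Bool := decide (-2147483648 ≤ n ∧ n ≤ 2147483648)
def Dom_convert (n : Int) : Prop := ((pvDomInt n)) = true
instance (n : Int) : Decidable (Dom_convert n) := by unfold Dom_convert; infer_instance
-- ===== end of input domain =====

-- B replaces the mod/div-then-reverse digit loop with a forward map over str(abs(n)) (idiomatic, no reversal, no n==0 special case).

-- ===== PORT A =====
-- the `while n:` loop; after `n = abs(n)` the value is nonnegative, so Python's
-- `n % 10` / `n //= 10` coincide with Nat `%` / `/` (PySem.Int.mod_natCast / floordiv_natCast)
def convertLoop (m : Nat) (digits : List Int) : List Int :=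
  if h : m = 0 then digits
  else convertLoop (m / 10) (digits ++ [((m % 10 : Nat) : Int)])
decreasing_by exact Nat.div_lt_self (Nat.pos_of_ne_zero h) (by norm_num)

def convert (n : Int) : List Int :=
  if n = 0 then [0]
  else
    let sign : Int := if 0 < n then 1 else -1
    match (convertLoop n.natAbs []).reverse with   -- digits.reverse()
    | [] => []                                     -- unreachable: digits ≠ [] when n ≠ 0
    | d :: ds => d * sign :: ds                    -- digits[0] *= sign

-- ===== PORT B =====
def convert_alt (n : Int) : List Int :=
  let digits := (PySem.Int.toChars |n|).map (fun c => ((c.toNat : Int) - 48))  -- [ord(c) - 48 for c in str(abs(n))]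
  if n < 0 then
    match digits with
    | [] => []                                     -- unreachable: str(abs(n)) is nonempty
    | d :: ds => (-d) :: ds                        -- digits[0] = -digits[0]
  else digits

-- ===== PRECONDITION & SPEC =====
def Spec_convert (n : Int) (out : List Int) : Prop := out = convert_alt n
instance (n : Int) (out : List Int) : Decidable (Spec_convert n out) := by unfold Spec_convert; infer_instance

-- ===== CLAIM (what is proved, stated in full; the proofs are below) =====
def Claim_equal_convert : Prop := ∀ (n : Int), Dom_convert n → Spec_convert n (convert n)

-- ===== LEMMAS AND PROOFS =====

-- little-endian decimal digits of m (what A's loop collects)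
def pvDigitsLE (m : Nat) : List Int :=
  if h : m = 0 then []
  else ((m % 10 : Nat) : Int) :: pvDigitsLE (m / 10)
decreasing_by exact Nat.div_lt_self (Nat.pos_of_ne_zero h) (by norm_num)

-- big-endian decimal digits of m (what both programs return, up to the sign fix-up)
def pvDigitsBE (m : Nat) : List Int :=
  if m < 10 then [(m : Nat)]
  else pvDigitsBE (m / 10) ++ [((m % 10 : Nat) : Int)]
decreasing_by exact Nat.div_lt_self (by omega) (by norm_num)

def pvDig (c : Char) : Int := (c.toNat : Int) - 48

lemma convertLoop_eq (m : Nat) : ∀ acc : List Int, convertLoop m acc = acc ++ pvDigitsLE m := by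
  induction m using Nat.strong_induction_on with
  | _ m ih =>
    intro acc
    rw [convertLoop, pvDigitsLE]
    by_cases h : m = 0
    · simp [h]
    · rw [dif_neg h, dif_neg h, ih (m / 10) (Nat.div_lt_self (Nat.pos_of_ne_zero h) (by norm_num))]
      simp

lemma reverse_pvDigitsLE (m : Nat) (h : m ≠ 0) : (pvDigitsLE m).reverse = pvDigitsBE m := by
  induction m using Nat.strong_induction_on with
  | _ m ih =>
    rw [pvDigitsLE, pvDigitsBE, dif_neg h]
    by_cases h10 : m < 10
    · have hd : m / 10 = 0 := Nat.div_eq_of_lt h10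
      have hm : m % 10 = m := Nat.mod_eq_of_lt h10
      rw [if_pos h10, hd, hm, pvDigitsLE]
      simp
    · have hq : m / 10 ≠ 0 := by omega
      rw [if_neg h10, List.reverse_cons,
        ih (m / 10) (Nat.div_lt_self (Nat.pos_of_ne_zero h) (by norm_num)) hq]

lemma pvDig_digitChar (d : Nat) (h : d < 10) : pvDig (Nat.digitChar d) = (d : Int) := by
  interval_cases d <;> rfl

lemma toDigitsCore_map (f : Nat) :
    ∀ (m : Nat) (acc : List Char), m < f →
      (Nat.toDigitsCore 10 f m acc).map pvDig = pvDigitsBE m ++ acc.map pvDig := by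
  induction f with
  | zero => intro m acc h; omega
  | succ f ih =>
    intro m acc h
    rw [Nat.toDigitsCore]
    by_cases h0 : m / 10 = 0
    · have h10 : m < 10 := by omega
      have hm : m % 10 = m := Nat.mod_eq_of_lt h10
      rw [if_pos h0, List.map_cons, pvDigitsBE, if_pos h10, hm, pvDig_digitChar m h10]
      simp
    · have hlt : m / 10 < f := by omega
      rw [if_neg h0, ih (m / 10) _ hlt]
      conv_rhs => rw [pvDigitsBE, if_neg (by omega : ¬ m < 10)]
      simp [pvDig_digitChar (m % 10) (Nat.mod_lt m (by norm_num))]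

lemma toChars_map (m : Nat) :
    (PySem.Int.toChars (m : Int)).map pvDig = pvDigitsBE m := by
  have : ¬ ((m : Int) < 0) := by omega
  rw [PySem.Int.toChars, if_neg this, Int.toNat_natCast, Nat.toDigits,
    toDigitsCore_map (m + 1) m [] (Nat.lt_succ_self m)]
  simp

lemma pvDigitsBE_zero : pvDigitsBE 0 = [0] := by rw [pvDigitsBE]; norm_num

-- ===== VERDICT (by name: the statement is the Claim_ definition above) =====
theorem convert_spec : Claim_equal_convert := by
  intro n _
  unfold Spec_convert convert convert_alt
  have habs : |n| = ((n.natAbs : Nat) : Int) := Int.abs_eq_natAbs n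
  rw [habs]
  have hmap : (PySem.Int.toChars ((n.natAbs : Nat) : Int)).map (fun c => ((c.toNat : Int) - 48))
      = pvDigitsBE n.natAbs := toChars_map n.natAbs
  by_cases h0 : n = 0
  · subst h0
    simp only [reduceIte]
    simpa [pvDigitsBE_zero] using hmap.symm
  · rw [if_neg h0, convertLoop_eq, List.nil_append, reverse_pvDigitsLE n.natAbs (by omega), hmap]
    cases hL : pvDigitsBE n.natAbs with
    | nil => by_cases hneg : n < 0 <;> simp [hneg]
    | cons d ds =>
      by_cases hneg : n < 0
      · rw [if_pos hneg, if_neg (by omega : ¬ 0 < n)]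
        simp
      · rw [if_neg hneg, if_pos (by omega : 0 < n)]
        simp
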